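-- pv_equiv track=rewrite | github.com/bcbeidel/wos | plugins/build/skills/check-python-script/scripts/_ast_checks.py | has_top_of_file_deps_comment
-- ===== SOURCE A (Python) =====
-- def has_top_of_file_deps_comment(source: str) -> bool:
--     """Heuristic — a top-of-file comment block mentioning 'dependencies'/'requires'."""
--     header_lines = []
--     for line in source.splitlines():
--         stripped = line.strip()
--         if not stripped:
--             continue
--         if (
--             stripped.startswith("#")
--             or stripped.startswith('"""')
--             or stripped.startswith("'''")
--         ):
--             header_lines.append(stripped.lower())
--             if len(header_lines) >= 30:
--                 break
--         else:
--             break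
--     joined = " ".join(header_lines)
--     return (
--         "requires" in joined or "dependencies" in joined or "requirements" in joined
--     ) and (
--         "pip" in joined
--         or "install" in joined
--         or "requires-python" in joined
--         or "==" in joined
--     )
-- ===== SOURCE B (Python) =====
-- def _subject(line):
--     return "requires" in line or "dependencies" in line or "requirements" in line
--
--
-- def _detail(line):
--     return "pip" in line or "install" in line or "requires-python" in line or "==" in line
--
--
-- def has_top_of_file_deps_comment(source: str) -> bool:
--     """Single streaming pass: OR-accumulate two flags per header line, no list, no join."""
--     has_subject = False
--     has_detail = False
--     n = 0
--     for line in source.splitlines():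
--         stripped = line.strip()
--         if not stripped:
--             continue
--         if not (
--             stripped.startswith("#")
--             or stripped.startswith('"""')
--             or stripped.startswith("'''")
--         ):
--             break
--         low = stripped.lower()
--         has_subject = has_subject or _subject(low)
--         has_detail = has_detail or _detail(low)
--         n += 1
--         if n >= 30:
--             break
--     return has_subject and has_detail
-- ===== Notes on version B (the rewrite author's own statement) =====
-- stated objective: simpler
-- what changed: Replaces A's collect-header-lines / join-with-spaces / seven-substring-searches-on-the-joined-string structure with a single streaming pass that OR-accumulates two boolean flags per header line, keeping no list and building no joined string.
import Mathlib
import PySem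

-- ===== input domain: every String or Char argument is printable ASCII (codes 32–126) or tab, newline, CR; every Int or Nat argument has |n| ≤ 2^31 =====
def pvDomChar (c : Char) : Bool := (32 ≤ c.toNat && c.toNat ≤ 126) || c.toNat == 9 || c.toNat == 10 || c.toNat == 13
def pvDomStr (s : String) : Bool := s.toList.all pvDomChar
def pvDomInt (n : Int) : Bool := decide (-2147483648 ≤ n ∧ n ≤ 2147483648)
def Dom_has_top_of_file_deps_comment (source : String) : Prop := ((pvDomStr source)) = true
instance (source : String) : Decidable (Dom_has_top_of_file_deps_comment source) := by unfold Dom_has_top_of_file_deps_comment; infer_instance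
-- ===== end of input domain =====

-- B replaces A's collect-lines/join-with-spaces/substring-search structure by a single streaming
-- pass that OR-accumulates two boolean flags per header line (objective: simpler — no list, no join).

-- ===== PORT A =====
-- the for-loop of A: collect stripped, lowered comment header lines (cap 30, blank lines skipped)
def pvHeaderA : List String → List String → List String
  | [], acc => acc
  | line :: rest, acc =>
    let stripped := PySem.Str.strip line
    if PySem.Str.len stripped = 0 then pvHeaderA rest acc
    else if PySem.Str.startswith stripped "#" || PySem.Str.startswith stripped "\"\"\"" ||
            PySem.Str.startswith stripped "'''" then
      let acc' := acc ++ [PySem.Str.lower stripped]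
      if 30 ≤ acc'.length then acc' else pvHeaderA rest acc'
    else acc

def has_top_of_file_deps_comment (source : String) : Bool :=
  let header_lines := pvHeaderA (PySem.Str.splitlines source) []
  let joined := PySem.Str.join " " header_lines
  (PySem.Str.isIn "requires" joined || PySem.Str.isIn "dependencies" joined ||
     PySem.Str.isIn "requirements" joined) &&
  (PySem.Str.isIn "pip" joined || PySem.Str.isIn "install" joined ||
     PySem.Str.isIn "requires-python" joined || PySem.Str.isIn "==" joined)

-- ===== PORT B =====
def pvSubject (line : String) : Bool :=
  PySem.Str.isIn "requires" line || PySem.Str.isIn "dependencies" line ||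
    PySem.Str.isIn "requirements" line

def pvDetail (line : String) : Bool :=
  PySem.Str.isIn "pip" line || PySem.Str.isIn "install" line ||
    PySem.Str.isIn "requires-python" line || PySem.Str.isIn "==" line

-- the for-loop of B: stream the lines, OR-updating the two flags, counter n capped at 30
def pvScanB : List String → Bool → Bool → Nat → Bool
  | [], hs, hd, _ => hs && hd
  | line :: rest, hs, hd, n =>
    let stripped := PySem.Str.strip line
    if PySem.Str.len stripped = 0 then pvScanB rest hs hd n
    else if !(PySem.Str.startswith stripped "#" || PySem.Str.startswith stripped "\"\"\"" ||
              PySem.Str.startswith stripped "'''") then hs && hd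
    else
      let low := PySem.Str.lower stripped
      let hs' := hs || pvSubject low
      let hd' := hd || pvDetail low
      if 30 ≤ n + 1 then hs' && hd' else pvScanB rest hs' hd' (n + 1)

def has_top_of_file_deps_comment_alt (source : String) : Bool :=
  pvScanB (PySem.Str.splitlines source) false false 0

-- ===== PRECONDITION & SPEC =====
def Spec_has_top_of_file_deps_comment (source : String) (out : Bool) : Prop := out = has_top_of_file_deps_comment_alt source
instance (source : String) (out : Bool) : Decidable (Spec_has_top_of_file_deps_comment source out) := by unfold Spec_has_top_of_file_deps_comment; infer_instance

-- ===== CLAIM (what is proved, stated in full; the proofs are below) =====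
def Claim_equal_has_top_of_file_deps_comment : Prop := ∀ (source : String), Dom_has_top_of_file_deps_comment source → Spec_has_top_of_file_deps_comment source (has_top_of_file_deps_comment source)

-- ===== LEMMAS AND PROOFS =====

-- proof-side view of A's header collection: same lines, with the remaining budget (30 - |acc|) explicit
def pvHdr : List String → Nat → List String
  | [], _ => []
  | line :: rest, b =>
    let stripped := PySem.Str.strip line
    if PySem.Str.len stripped = 0 then pvHdr rest b
    else if PySem.Str.startswith stripped "#" || PySem.Str.startswith stripped "\"\"\"" ||
            PySem.Str.startswith stripped "'''" then
      PySem.Str.lower stripped :: (if b ≤ 1 then [] else pvHdr rest (b - 1))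
    else []

theorem pvHeaderA_eq_pvHdr : ∀ (lines : List String) (acc : List String), acc.length < 30 →
    pvHeaderA lines acc = acc ++ pvHdr lines (30 - acc.length) := by
  intro lines
  induction lines with
  | nil => intro acc _; simp [pvHeaderA, pvHdr]
  | cons line rest ih =>
    intro acc hacc
    by_cases h0 : PySem.Str.len (PySem.Str.strip line) = 0
    · simp only [pvHeaderA, pvHdr, if_pos h0]; exact ih acc hacc
    · by_cases hc : (PySem.Str.startswith (PySem.Str.strip line) "#" ||
          PySem.Str.startswith (PySem.Str.strip line) "\"\"\"" ||
          PySem.Str.startswith (PySem.Str.strip line) "'''") = true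
      · simp only [pvHeaderA, pvHdr, if_neg h0, if_pos hc]
        by_cases hcap : 30 ≤ (acc ++ [PySem.Str.lower (PySem.Str.strip line)]).length
        · have hb : 30 - acc.length ≤ 1 := by simp at hcap; omega
          rw [if_pos hcap, if_pos hb]
        · have hb : ¬ (30 - acc.length ≤ 1) := by simp at hcap; omega
          have hlen : (acc ++ [PySem.Str.lower (PySem.Str.strip line)]).length < 30 := by
            simp at hcap ⊢; omega
          rw [if_neg hcap, if_neg hb, ih _ hlen]
          have h2 : 30 - (acc ++ [PySem.Str.lower (PySem.Str.strip line)]).length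
              = 30 - acc.length - 1 := by
            simp only [List.length_append, List.length_cons, List.length_nil]; omega
          rw [h2]
          simp
      · simp only [pvHeaderA, pvHdr, if_neg h0, if_neg hc]; simp

theorem pvScanB_eq : ∀ (lines : List String) (hs hd : Bool) (n : Nat), n < 30 →
    pvScanB lines hs hd n =
      ((hs || (pvHdr lines (30 - n)).any pvSubject) &&
       (hd || (pvHdr lines (30 - n)).any pvDetail)) := by
  intro lines
  induction lines with
  | nil => intro hs hd n _; simp [pvScanB, pvHdr]
  | cons line rest ih =>
    intro hs hd n hn
    by_cases h0 : PySem.Str.len (PySem.Str.strip line) = 0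
    · simp only [pvScanB, pvHdr, if_pos h0]; exact ih hs hd n hn
    · by_cases hc : (PySem.Str.startswith (PySem.Str.strip line) "#" ||
          PySem.Str.startswith (PySem.Str.strip line) "\"\"\"" ||
          PySem.Str.startswith (PySem.Str.strip line) "'''") = true
      · simp only [pvScanB, pvHdr, if_neg h0, hc, Bool.not_true, Bool.false_eq_true,
          if_false, if_true]
        by_cases hcap : 30 ≤ n + 1
        · have hb : 30 - n ≤ 1 := by omega
          simp [hcap, hb]
        · have hb : ¬ (30 - n ≤ 1) := by omega
          have h31 : 30 - (n + 1) = 30 - n - 1 := by omega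
          rw [if_neg hcap, if_neg hb, ih _ _ (n + 1) (by omega), h31]
          simp [List.any_cons, Bool.or_assoc]
      · rw [Bool.not_eq_true] at hc
        simp only [pvScanB, pvHdr, if_neg h0, hc, Bool.not_false, if_true,
          Bool.false_eq_true, if_false]
        simp

-- a keyword without a space is not a prefix reaching past the inserted space
theorem pvPrefix_no_space : ∀ (x : List Char) {k q : List Char}, (' ' ∉ k) →
    k <+: x ++ ' ' :: q → k <+: x := by
  intro x
  induction x with
  | nil =>
    intro k q hk h
    cases k with
    | nil => exact List.nil_prefix
    | cons c t =>
      rcases List.cons_prefix_cons.mp h with ⟨hc, _⟩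
      exact absurd (hc ▸ List.mem_cons_self) hk
  | cons d x' ih =>
    intro k q hk h
    cases k with
    | nil => exact List.nil_prefix
    | cons c t =>
      rcases List.cons_prefix_cons.mp h with ⟨hc, ht⟩
      have ht' : t <+: x' := ih (fun hm => hk (List.mem_cons_of_mem _ hm)) ht
      exact List.cons_prefix_cons.mpr ⟨hc, ht'⟩

-- an occurrence of a space-free keyword cannot cross the joining space
theorem pvInfix_split : ∀ (p : List Char) {k q : List Char}, (' ' ∉ k) → k ≠ [] →
    (k <:+: p ++ ' ' :: q ↔ k <:+: p ∨ k <:+: q) := by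
  intro p
  induction p with
  | nil =>
    intro k q hk hne
    constructor
    · intro h
      rcases List.infix_cons_iff.mp h with hp | hi
      · cases k with
        | nil => exact absurd rfl hne
        | cons c t =>
          rcases List.cons_prefix_cons.mp hp with ⟨hc, _⟩
          exact absurd (hc ▸ List.mem_cons_self) hk
      · exact Or.inr hi
    · rintro (h | h)
      · rw [List.infix_nil] at h; exact absurd h hne
      · exact h.trans (List.suffix_cons ' ' q).isInfix
  | cons c p' ih =>
    intro k q hk hne
    constructor
    · intro h
      rcases List.infix_cons_iff.mp h with hp | hi
      · exact Or.inl (pvPrefix_no_space (c :: p') hk hp).isInfix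
      · rcases (ih hk hne).mp hi with h1 | h2
        · exact Or.inl (List.infix_cons_iff.mpr (Or.inr h1))
        · exact Or.inr h2
    · rintro (h | h)
      · exact h.trans (List.prefix_append _ _).isInfix
      · exact h.trans ((List.suffix_cons ' ' q).trans (List.suffix_append _ _)).isInfix

theorem pvIsIn_append_space (k a q : List Char) (hk : ' ' ∉ k) (hne : k ≠ []) :
    PySem.Chars.isIn k (a ++ ' ' :: q) = (PySem.Chars.isIn k a || PySem.Chars.isIn k q) := by
  rw [Bool.eq_iff_iff]
  simp [PySem.Chars.isIn_iff_infix, pvInfix_split a hk hne]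

theorem pvIsIn_join_chars (k : List Char) (hk : ' ' ∉ k) (hne : k ≠ []) :
    ∀ (parts : List (List Char)),
      PySem.Chars.isIn k (PySem.Chars.join [' '] parts) = parts.any (fun p => PySem.Chars.isIn k p) := by
  intro parts
  induction parts with
  | nil =>
    rw [PySem.Chars.join_nil]
    rw [Bool.eq_iff_iff]
    simp [PySem.Chars.isIn_iff_infix, List.infix_nil, hne]
  | cons a tl ih =>
    cases tl with
    | nil =>
      rw [PySem.Chars.join_singleton]
      simp
    | cons b tl' =>
      rw [PySem.Chars.join_cons_cons, List.append_assoc, List.singleton_append,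
        pvIsIn_append_space k a _ hk hne, ih]
      simp

theorem pvIsIn_join (k : String) (hk : ' ' ∉ k.toList) (hne : k.toList ≠ []) (parts : List String) :
    PySem.Str.isIn k (PySem.Str.join " " parts) = parts.any (fun p => PySem.Str.isIn k p) := by
  rw [PySem.Str.isIn_eq, PySem.Str.toList_join]
  have hsep : (" " : String).toList = [' '] := rfl
  rw [hsep, pvIsIn_join_chars k.toList hk hne, List.any_map]
  rfl

theorem pvAnyOr (l : List String) (p q : String → Bool) :
    (l.any fun x => p x || q x) = (l.any p || l.any q) := by
  induction l with
  | nil => simp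
  | cons x t ihx =>
    simp only [List.any_cons, ihx]
    cases p x <;> cases q x <;> simp

-- ===== VERDICT (by name: the statement is the Claim_ definition above) =====
theorem has_top_of_file_deps_comment_spec : Claim_equal_has_top_of_file_deps_comment := by
  unfold Claim_equal_has_top_of_file_deps_comment
  intro source _
  unfold Spec_has_top_of_file_deps_comment
  unfold has_top_of_file_deps_comment has_top_of_file_deps_comment_alt
  rw [pvScanB_eq _ false false 0 (by omega),
      pvHeaderA_eq_pvHdr (PySem.Str.splitlines source) [] (by simp)]
  simp only [List.length_nil, Nat.sub_zero, List.nil_append, Bool.false_or]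
  rw [pvIsIn_join "requires" (by decide) (by decide),
      pvIsIn_join "dependencies" (by decide) (by decide),
      pvIsIn_join "requirements" (by decide) (by decide),
      pvIsIn_join "pip" (by decide) (by decide),
      pvIsIn_join "install" (by decide) (by decide),
      pvIsIn_join "requires-python" (by decide) (by decide),
      pvIsIn_join "==" (by decide) (by decide)]
  have hsub : pvSubject = fun l => PySem.Str.isIn "requires" l ||
      PySem.Str.isIn "dependencies" l || PySem.Str.isIn "requirements" l := rfl
  have hdet : pvDetail = fun l => PySem.Str.isIn "pip" l || PySem.Str.isIn "install" l ||
      PySem.Str.isIn "requires-python" l || PySem.Str.isIn "==" l := rfl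
  rw [hsub, hdet]
  simp [pvAnyOr]
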